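-- pv_equiv track=rewrite | github.com/sainthm/MGS_AI_DS | KTW/example/5.보이는학생.py | solution
-- ===== SOURCE A (Python) =====
-- def solution(nums):
--     answer = 1
--     maxH = nums[0]
--     for i in range(1, len(nums)):
--         if nums[i] > maxH:
--             answer += 1
--             maxH = nums[i]
--
--     return answer
-- ===== SOURCE B (Python) =====
-- def solution(nums):
--     # Two-stage: build the running-max (prefix maximum) list, then count its
--     # distinct values; each visible student contributes a new distinct maximum.
--     prefix = []
--     for x in nums:
--         prefix.append(x if not prefix or x > prefix[-1] else prefix[-1])
--     return len(set(prefix))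
-- ===== Notes on version B (the rewrite author's own statement) =====
-- stated objective: alternative
-- what changed: B replaces A's fused count+max loop by a two-stage shape: build the prefix-maximum list, then return the number of distinct values in it (len(set(prefix))).
import Mathlib
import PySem

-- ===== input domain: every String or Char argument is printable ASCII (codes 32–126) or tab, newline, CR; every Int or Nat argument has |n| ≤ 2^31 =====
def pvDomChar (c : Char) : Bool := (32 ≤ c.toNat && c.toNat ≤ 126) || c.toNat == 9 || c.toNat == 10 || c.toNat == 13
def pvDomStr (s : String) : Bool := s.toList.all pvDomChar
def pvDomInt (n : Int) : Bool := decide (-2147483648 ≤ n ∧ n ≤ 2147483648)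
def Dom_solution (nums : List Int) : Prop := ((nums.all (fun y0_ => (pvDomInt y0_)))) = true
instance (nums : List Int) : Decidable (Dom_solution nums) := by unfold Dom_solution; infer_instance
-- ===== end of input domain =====

-- B replaces A's fused count+max loop by building the prefix-maximum list and
-- counting its distinct values (len(set(prefix))); same O(n) cost, different shape.
-- On the empty list A raises IndexError, so Pre_solution excludes it.

-- ===== PORT A =====
def solution (nums : List Int) : Int :=
  let maxH0 := PySem.List.pyGetD nums 0 0   -- first element; IndexError on the empty list is excluded by Pre_solution
  let st := (PySem.List.pyRange 1 (PySem.List.len nums) 1).foldl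
    (fun (st : Int × Int) i =>
      if PySem.List.pyGetD nums i 0 > st.2 then (st.1 + 1, PySem.List.pyGetD nums i 0) else st)
    (1, maxH0)
  st.1

-- ===== PORT B =====
def solution_alt (nums : List Int) : Int :=
  let pref := nums.foldl
    (fun (pre : List Int) x =>
      pre ++ [if pre = [] ∨ x > PySem.List.pyGetD pre (-1) 0 then x
              else PySem.List.pyGetD pre (-1) 0]) []
  PySem.Set.len (PySem.Set.ofList pref)

-- ===== PRECONDITION & SPEC =====
-- A reads the first element, so it raises IndexError exactly on the empty list.
def Pre_solution (nums : List Int) : Prop := nums ≠ []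
instance (nums : List Int) : Decidable (Pre_solution nums) := by unfold Pre_solution; infer_instance
def pvWitness_solution : List Int := [3, 1, 4]

def Spec_solution (nums : List Int) (out : Int) : Prop := out = solution_alt nums
instance (nums : List Int) (out : Int) : Decidable (Spec_solution nums out) := by unfold Spec_solution; infer_instance

-- ===== CLAIM (what is proved, stated in full; the proofs are below) =====
def Claim_equal_solution : Prop := ∀ (nums : List Int), Dom_solution nums → Pre_solution nums → Spec_solution nums (solution nums)

-- ===== LEMMAS AND PROOFS =====

-- common spec: number of elements strictly greater than every earlier one and m
def pvCount (m : Int) : List Int → Int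
  | [] => 0
  | x :: t => (if x > m then 1 else 0) + pvCount (max m x) t

-- A-side invariant
lemma solA_fold (t : List Int) : ∀ (a m : Int),
    (t.foldl (fun (st : Int × Int) x => if x > st.2 then (st.1 + 1, x) else st) (a, m)).1
      = a + pvCount m t := by
  induction t with
  | nil => intro a m; simp [pvCount]
  | cons x t ih =>
    intro a m
    simp only [List.foldl_cons, pvCount]
    by_cases h : x > m
    · simp [h, ih, max_eq_right (le_of_lt h)]; ring
    · simp [h, ih, max_eq_left (not_lt.mp h)]

-- running-max list
def pvRM (m : Int) : List Int → List Int
  | [] => []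
  | x :: t => max m x :: pvRM (max m x) t

-- B's prefix-building fold, from a nonempty accumulator ending in m
lemma solB_build (t : List Int) : ∀ (pre : List Int) (m : Int), pre ≠ [] → pre.getLast? = some m →
    (t.foldl (fun (pre : List Int) x =>
        pre ++ [if pre = [] ∨ x > PySem.List.pyGetD pre (-1) 0 then x
                else PySem.List.pyGetD pre (-1) 0]) pre)
      = pre ++ pvRM m t := by
  induction t with
  | nil => intro pre m _ _; simp [pvRM]
  | cons x t ih =>
    intro pre m hne hlast
    have hget : PySem.List.pyGetD pre (-1) 0 = m := by
      simp [PySem.List.pyGetD, PySem.List.pyGet?_neg_one, hlast]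
    simp only [List.foldl_cons, pvRM]
    by_cases h : x > m
    · have : (if pre = [] ∨ x > PySem.List.pyGetD pre (-1) 0 then x
              else PySem.List.pyGetD pre (-1) 0) = x := by simp [hget, h]
      rw [this, ih (pre ++ [x]) x (by simp) (by simp), max_eq_right (le_of_lt h)]
      simp
    · have : (if pre = [] ∨ x > PySem.List.pyGetD pre (-1) 0 then x
              else PySem.List.pyGetD pre (-1) 0) = m := by simp [hget, hne, not_lt.mp h]
      rw [this, ih (pre ++ [m]) m (by simp) (by simp), max_eq_left (not_lt.mp h)]
      simp

-- folding Set.add over a running-max list only grows by the strict increases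
lemma solB_count (t : List Int) : ∀ (m : Int) (s : List Int),
    (∀ y ∈ s, y ≤ m) → m ∈ s →
    (((pvRM m t).foldl PySem.Set.add s).length : Int) = (s.length : Int) + pvCount m t := by
  induction t with
  | nil => intro m s _ _; simp [pvRM, pvCount]
  | cons x t ih =>
    intro m s hle hmem
    simp only [pvRM, pvCount, List.foldl_cons]
    by_cases h : x > m
    · have hmax : max m x = x := max_eq_right (le_of_lt h)
      have hnot : x ∉ s := fun hx => absurd (hle x hx) (not_le.mpr h)
      have hle' : ∀ y ∈ s ++ [x], y ≤ x := by
        intro y hy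
        rcases List.mem_append.mp hy with hy | hy
        · exact le_of_lt (lt_of_le_of_lt (hle y hy) h)
        · simp at hy; omega
      rw [hmax, PySem.Set.add_of_not_mem hnot, ih x (s ++ [x]) hle' (by simp)]
      simp [h]; ring
    · have hmax : max m x = m := max_eq_left (not_lt.mp h)
      rw [hmax, PySem.Set.add_of_mem hmem, ih m s hle hmem]
      simp [h]

-- ===== VERDICT (by name: the statement is the Claim_ definition above) =====
theorem solution_spec : Claim_equal_solution := by
  intro nums _ hpre
  unfold Spec_solution solution solution_alt
  obtain ⟨h, t, rfl⟩ := List.exists_cons_of_ne_nil hpre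
  simp only []
  rw [show PySem.List.len (h :: t) = ((h :: t).length : Int) from PySem.List.len_eq _,
    PySem.List.foldl_pyRange_pyGetD' (h :: t) 0
      (fun (st : Int × Int) x => if x > st.2 then (st.1 + 1, x) else st)
      (1, PySem.List.pyGetD (h :: t) 0 0) (by omega : (0:Int) ≤ 1)]
  have hA := solA_fold ((h :: t).drop (1 : Int).toNat) 1 (PySem.List.pyGetD (h :: t) 0 0)
  simp only [Int.toNat_one, List.drop_one, List.tail_cons] at hA ⊢
  have h0 : PySem.List.pyGetD (h :: t) 0 0 = h := by
    simp [PySem.List.pyGetD]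
  rw [h0] at hA ⊢
  rw [hA]
  have hB : ((h :: t).foldl
      (fun (pre : List Int) x =>
        pre ++ [if pre = [] ∨ x > PySem.List.pyGetD pre (-1) 0 then x
                else PySem.List.pyGetD pre (-1) 0]) [])
      = [h] ++ pvRM h t := by
    simp only [List.foldl_cons, List.nil_append, true_or, if_true]
    exact solB_build t [h] h (by simp) (by simp)
  rw [hB]
  have hC := solB_count t h [h] (by simp) (by simp)
  simp only [List.length_cons, List.length_nil] at hC
  unfold PySem.Set.len PySem.Set.ofList
  show (1 : Int) + pvCount h t = _
  rw [show PySem.Set.empty = ([] : List Int) from rfl, List.foldl_append,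
    show List.foldl PySem.Set.add ([] : List Int) [h] = [h] from rfl, hC]
  push_cast; ring
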